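-- pv_equiv track=rewrite | github.com/sammyjdev/aerus-game-master-platform | backend/src/inventory_manager.py | normalize_currency
-- ===== SOURCE A (Python) =====
-- _CURRENCY_ORDER = ["copper", "silver", "gold", "platinum"]
--
-- _CURRENCY_FACTOR = {
--     "copper": 1,
--     "silver": 100,
--     "gold": 10_000,
--     "platinum": 1_000_000,
-- }
--
-- def normalize_currency(total_copper: int) -> dict[str, int]:
--     """Normalize total copper into platinum/gold/silver/copper using 100:1 steps."""
--     remaining = max(0, int(total_copper))
--     wallet = dict.fromkeys(_CURRENCY_ORDER, 0)
--     for tier in reversed(_CURRENCY_ORDER):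
--         factor = _CURRENCY_FACTOR[tier]
--         wallet[tier] = remaining // factor
--         remaining = remaining % factor
--     return wallet
-- ===== SOURCE B (Python) =====
-- def normalize_currency(total_copper: int) -> dict[str, int]:
--     """Normalize total copper using successive divmod by 100, no factor table."""
--     remaining = max(0, int(total_copper))
--     remaining, copper = divmod(remaining, 100)
--     remaining, silver = divmod(remaining, 100)
--     platinum, gold = divmod(remaining, 100)
--     return {"copper": copper, "silver": silver, "gold": gold, "platinum": platinum}
-- ===== Notes on version B (the rewrite author's own statement) =====
-- stated objective: simpler
-- what changed: Replaces the _CURRENCY_FACTOR table and the running-remainder loop over descending cumulative factors with three successive divmod-by-100 steps on a shrinking quotient, assigning the final quotient to platinum.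
import Mathlib
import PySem

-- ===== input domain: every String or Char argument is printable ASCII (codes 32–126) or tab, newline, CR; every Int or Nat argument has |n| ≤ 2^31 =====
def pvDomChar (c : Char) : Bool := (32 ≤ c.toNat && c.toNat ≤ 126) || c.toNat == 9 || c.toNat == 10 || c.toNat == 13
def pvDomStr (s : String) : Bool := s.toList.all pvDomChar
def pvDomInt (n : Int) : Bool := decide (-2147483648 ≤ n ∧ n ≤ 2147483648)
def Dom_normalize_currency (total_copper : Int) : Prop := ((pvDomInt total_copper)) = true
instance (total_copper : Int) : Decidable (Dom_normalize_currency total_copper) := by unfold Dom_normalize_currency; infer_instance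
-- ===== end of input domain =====

-- B replaces A's _CURRENCY_FACTOR table and running-remainder loop with three successive
-- divmod-by-100 steps on a shrinking quotient (objective: simpler).


-- ===== PORT A =====
def pvCurrencyOrder : List String := ["copper", "silver", "gold", "platinum"]

def pvCurrencyFactor : PySem.Dict String Int :=
  PySem.Dict.ofList [("copper", 1), ("silver", 100), ("gold", 10000), ("platinum", 1000000)]

def normalize_currency (total_copper : Int) : List (String × Int) :=
  let remaining : Int := max 0 total_copper
  -- dict.fromkeys(_CURRENCY_ORDER, 0)
  let wallet : PySem.Dict String Int :=
    pvCurrencyOrder.foldl (fun d k => d.insert k 0) PySem.Dict.empty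
  -- for tier in reversed(_CURRENCY_ORDER): …  (keys always present, so getD never takes its default)
  let st := pvCurrencyOrder.reverse.foldl
    (fun (st : PySem.Dict String Int × Int) tier =>
      let factor := pvCurrencyFactor.getD tier 0
      ((st.1.insert tier (PySem.Int.floordiv st.2 factor)), PySem.Int.mod st.2 factor))
    (wallet, remaining)
  st.1.items

-- ===== PORT B =====
def normalize_currency_alt (total_copper : Int) : List (String × Int) :=
  let r0 : Int := max 0 total_copper
  let r1 := PySem.Int.floordiv r0 100
  let copper := PySem.Int.mod r0 100
  let r2 := PySem.Int.floordiv r1 100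
  let silver := PySem.Int.mod r1 100
  let platinum := PySem.Int.floordiv r2 100
  let gold := PySem.Int.mod r2 100
  [("copper", copper), ("silver", silver), ("gold", gold), ("platinum", platinum)]

-- ===== PRECONDITION & SPEC =====
def Spec_normalize_currency (total_copper : Int) (out : List (String × Int)) : Prop := out = normalize_currency_alt total_copper
instance (total_copper : Int) (out : List (String × Int)) : Decidable (Spec_normalize_currency total_copper out) := by unfold Spec_normalize_currency; infer_instance

-- ===== CLAIM (what is proved, stated in full; the proofs are below) =====
def Claim_equal_normalize_currency : Prop := ∀ (total_copper : Int), Dom_normalize_currency total_copper → Spec_normalize_currency total_copper (normalize_currency total_copper)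

-- ===== LEMMAS AND PROOFS =====

-- ===== VERDICT (by name: the statement is the Claim_ definition above) =====
theorem normalize_currency_spec : Claim_equal_normalize_currency := by
  intro n _
  unfold Spec_normalize_currency normalize_currency normalize_currency_alt
  simp [pvCurrencyOrder, pvCurrencyFactor, List.foldl,
        PySem.Dict.insert, PySem.Dict.empty, PySem.Dict.getD, PySem.Dict.get?,
        PySem.Dict.ofList, PySem.Dict.update, List.find?,
        PySem.Int.floordiv, PySem.Int.mod, Int.fdiv_eq_ediv, Int.fmod_eq_emod]
  omega
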